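-- pv_equiv track=rewrite | github.com/tvrzj/advent_of_code24 | scripts/2.py | inc_analyze
-- ===== SOURCE A (Python) =====
-- def inc_analyze(file):
--     filtered_file = []
--     for report in file:
--         # Check if the report is either entirely increasing or entirely decreasing
--         inc = all(report[i] > report[i - 1] for i in range(1, len(report)))
--         dec = all(report[i] < report[i - 1] for i in range(1, len(report)))
--
--         if inc or dec:
--             filtered_file.append(report)
--
--     return filtered_file
-- ===== SOURCE B (Python) =====
-- def inc_analyze(file):
--     filtered_file = []
--     for report in file:
--         s = sorted(report)
--         if len(set(report)) == len(report) and (report == s or report == s[::-1]):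
--             filtered_file.append(report)
--     return filtered_file
-- ===== Notes on version B (the rewrite author's own statement) =====
-- stated objective: simpler
-- what changed: Replaces the two adjacent-pair index scans with a sort-based test: a report is kept iff its elements are distinct and it equals its sorted copy or the reverse of it.
import Mathlib
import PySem

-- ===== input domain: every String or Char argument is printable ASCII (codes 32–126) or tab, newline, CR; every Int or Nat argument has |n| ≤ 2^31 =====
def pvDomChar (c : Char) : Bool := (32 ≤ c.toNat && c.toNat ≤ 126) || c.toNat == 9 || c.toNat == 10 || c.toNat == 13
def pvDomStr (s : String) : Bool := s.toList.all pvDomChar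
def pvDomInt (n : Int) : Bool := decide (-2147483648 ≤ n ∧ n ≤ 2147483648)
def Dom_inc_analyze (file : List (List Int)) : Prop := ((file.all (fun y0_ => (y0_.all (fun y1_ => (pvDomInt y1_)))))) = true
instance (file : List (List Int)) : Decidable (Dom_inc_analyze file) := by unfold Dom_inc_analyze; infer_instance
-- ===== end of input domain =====

-- B keeps a report iff its elements are distinct and it equals its sorted copy or that copy reversed, replacing A's two adjacent-pair index scans; objective: simpler.


-- ===== PORT A =====
-- inc = all(report[i] > report[i-1] for i in range(1, len(report)))  (every index is in range, so pyGetD's default is never used)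
def pvIncA (report : List Int) : Bool :=
  (PySem.List.pyRange 1 (report.length : Int) 1).all
    (fun i => decide (PySem.List.pyGetD report i 0 > PySem.List.pyGetD report (i - 1) 0))

-- dec = all(report[i] < report[i-1] for i in range(1, len(report)))
def pvDecA (report : List Int) : Bool :=
  (PySem.List.pyRange 1 (report.length : Int) 1).all
    (fun i => decide (PySem.List.pyGetD report i 0 < PySem.List.pyGetD report (i - 1) 0))

def inc_analyze (file : List (List Int)) : List (List Int) :=
  file.foldl (fun filtered_file report =>
    if pvIncA report || pvDecA report then filtered_file ++ [report] else filtered_file) []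

-- ===== PORT B =====
-- len(set(report)) == len(report) and (report == s or report == s[::-1]); s[::-1] is s.reverse (PySem.List.slice?_none_none_neg_one)
def pvKeepB (report : List Int) : Bool :=
  let s := PySem.List.sorted report (fun x => x) false
  ((PySem.Set.ofList report).length == report.length) &&
    (report == s || report == s.reverse)

def inc_analyze_alt (file : List (List Int)) : List (List Int) :=
  file.foldl (fun filtered_file report =>
    if pvKeepB report then filtered_file ++ [report] else filtered_file) []

-- ===== PRECONDITION & SPEC =====
def Spec_inc_analyze (file : List (List Int)) (out : List (List Int)) : Prop := out = inc_analyze_alt file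
instance (file : List (List Int)) (out : List (List Int)) : Decidable (Spec_inc_analyze file out) := by unfold Spec_inc_analyze; infer_instance

-- ===== CLAIM (what is proved, stated in full; the proofs are below) =====
def Claim_equal_inc_analyze : Prop := ∀ (file : List (List Int)), Dom_inc_analyze file → Spec_inc_analyze file (inc_analyze file)

-- ===== LEMMAS AND PROOFS =====

-- PySem.Set.add keeps a sublist of s ++ [x]
theorem pv_add_sublist (s : List Int) (x : Int) : (PySem.Set.add s x).Sublist (s ++ [x]) := by
  unfold PySem.Set.add
  split
  · exact List.sublist_append_left s [x]
  · exact List.Sublist.refl _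

theorem pv_foldl_add_sublist (l : List Int) :
    ∀ s : List Int, (l.foldl PySem.Set.add s).Sublist (s ++ l) := by
  induction l with
  | nil => simp
  | cons x t ih =>
    intro s
    have h2 : ((PySem.Set.add s x) ++ t).Sublist ((s ++ [x]) ++ t) :=
      (pv_add_sublist s x).append_right t
    simpa using (ih (PySem.Set.add s x)).trans h2

theorem pv_ofList_sublist (l : List Int) : (PySem.Set.ofList l).Sublist l := by
  simpa [PySem.Set.ofList_eq_foldl] using pv_foldl_add_sublist l []

-- set(l) has the same size as l iff l has no duplicates
theorem pv_ofList_length_eq_iff (l : List Int) :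
    (PySem.Set.ofList l).length = l.length ↔ l.Nodup := by
  constructor
  · intro h
    have he := (pv_ofList_sublist l).eq_of_length h
    rw [← he]
    exact PySem.Set.nodup_ofList l
  · intro h
    exact congrArg List.length (PySem.Set.ofList_eq_self_of_nodup l h)

-- A's index scan is the adjacent-pair chain
theorem pvIncA_iff (l : List Int) : pvIncA l = true ↔ l.IsChain (· < ·) := by
  unfold pvIncA
  rw [List.all_eq_true, List.isChain_iff_getElem]
  constructor
  · intro h i hi
    have h2 : ((i+1 : Nat) : Int) ∈ PySem.List.pyRange 1 (l.length : Int) 1 := by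
      rw [PySem.List.mem_pyRange_one]; constructor <;> omega
    have h3 := h _ h2
    simp only [decide_eq_true_eq] at h3
    have e1 : ((i+1 : Nat) : Int) - 1 = ((i : Nat) : Int) := by push_cast; ring
    rw [e1, PySem.List.pyGetD_natCast, PySem.List.pyGetD_natCast] at h3
    rwa [List.getD_eq_getElem _ _ hi, List.getD_eq_getElem _ _ (by omega)] at h3
  · intro h i hi
    rw [PySem.List.mem_pyRange_one] at hi
    simp only [decide_eq_true_eq]
    obtain ⟨k, rfl⟩ : ∃ k : Nat, i = ((k+1 : Nat) : Int) := ⟨i.toNat - 1, by omega⟩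
    have hk : k + 1 < l.length := by omega
    have e1 : ((k+1 : Nat) : Int) - 1 = ((k : Nat) : Int) := by push_cast; ring
    rw [e1, PySem.List.pyGetD_natCast, PySem.List.pyGetD_natCast,
      List.getD_eq_getElem _ _ hk, List.getD_eq_getElem _ _ (by omega)]
    exact h k hk

theorem pvDecA_iff (l : List Int) : pvDecA l = true ↔ l.IsChain (· > ·) := by
  unfold pvDecA
  rw [List.all_eq_true, List.isChain_iff_getElem]
  constructor
  · intro h i hi
    have h2 : ((i+1 : Nat) : Int) ∈ PySem.List.pyRange 1 (l.length : Int) 1 := by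
      rw [PySem.List.mem_pyRange_one]; constructor <;> omega
    have h3 := h _ h2
    simp only [decide_eq_true_eq] at h3
    have e1 : ((i+1 : Nat) : Int) - 1 = ((i : Nat) : Int) := by push_cast; ring
    rw [e1, PySem.List.pyGetD_natCast, PySem.List.pyGetD_natCast] at h3
    rwa [List.getD_eq_getElem _ _ hi, List.getD_eq_getElem _ _ (by omega)] at h3
  · intro h i hi
    rw [PySem.List.mem_pyRange_one] at hi
    simp only [decide_eq_true_eq]
    obtain ⟨k, rfl⟩ : ∃ k : Nat, i = ((k+1 : Nat) : Int) := ⟨i.toNat - 1, by omega⟩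
    have hk : k + 1 < l.length := by omega
    have e1 : ((k+1 : Nat) : Int) - 1 = ((k : Nat) : Int) := by push_cast; ring
    rw [e1, PySem.List.pyGetD_natCast, PySem.List.pyGetD_natCast,
      List.getD_eq_getElem _ _ hk, List.getD_eq_getElem _ _ (by omega)]
    exact h k hk

-- l equals its sorted copy iff it is weakly increasing
theorem pv_eq_sorted_iff (l : List Int) :
    l = PySem.List.sorted l (fun x => x) false ↔ l.Pairwise (· ≤ ·) := by
  constructor
  · intro h
    rw [h]
    exact PySem.List.sorted_pairwise l (fun x => x)
  · intro h
    exact (PySem.List.sorted_eq_self_of_pairwise l _ h).symm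

-- l equals its sorted copy reversed iff it is weakly decreasing
theorem pv_eq_sorted_rev_iff (l : List Int) :
    l = (PySem.List.sorted l (fun x => x) false).reverse ↔ l.Pairwise (· ≥ ·) := by
  constructor
  · intro h
    have h2 : l.reverse = PySem.List.sorted l (fun x => x) := by
      conv_lhs => rw [h]
      rw [List.reverse_reverse]
    have hp := PySem.List.sorted_pairwise l (fun x => x)
    rw [← h2, List.pairwise_reverse] at hp
    exact hp
  · intro h
    have hrev : l.reverse.Pairwise (fun a b => a ≤ b) := by
      rw [List.pairwise_reverse]; exact h
    have he := PySem.List.sorted_id_eq_of_perm_of_pairwise l l.reverse (List.reverse_perm l) hrev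
    rw [he, List.reverse_reverse]

theorem pv_pairwise_lt_iff (l : List Int) : l.Pairwise (· < ·) ↔ l.Pairwise (· ≤ ·) ∧ l.Nodup := by
  constructor
  · exact fun h => ⟨h.imp le_of_lt, h.imp ne_of_lt⟩
  · rintro ⟨h1, h2⟩
    exact (h1.and h2).imp (fun h => lt_of_le_of_ne h.1 h.2)

theorem pv_pairwise_gt_iff (l : List Int) : l.Pairwise (· > ·) ↔ l.Pairwise (· ≥ ·) ∧ l.Nodup := by
  constructor
  · exact fun h => ⟨h.imp le_of_lt, h.imp (fun h => (ne_of_lt h).symm)⟩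
  · rintro ⟨h1, h2⟩
    exact (h1.and h2).imp (fun h => lt_of_le_of_ne h.1 h.2.symm)

-- per-report agreement of the two tests
theorem pv_keep_eq (l : List Int) : (pvIncA l || pvDecA l) = pvKeepB l := by
  rw [Bool.eq_iff_iff]
  unfold pvKeepB
  simp only [Bool.or_eq_true, Bool.and_eq_true, beq_iff_eq, pvIncA_iff, pvDecA_iff,
    List.isChain_iff_pairwise]
  rw [pv_ofList_length_eq_iff, pv_pairwise_lt_iff, pv_pairwise_gt_iff,
    pv_eq_sorted_iff, pv_eq_sorted_rev_iff]
  tauto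

-- ===== VERDICT (by name: the statement is the Claim_ definition above) =====
theorem inc_analyze_spec : Claim_equal_inc_analyze := by
  intro file _
  unfold Spec_inc_analyze inc_analyze inc_analyze_alt
  simp only [pv_keep_eq]
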